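-- pv_equiv track=rewrite | github.com/Pioneer4334/Min-Hash | MinHash.py | dna_shingle
-- ===== SOURCE A (Python) =====
-- def dna_shingle(dna, k):
--     count, lastIndex = 0, k
--     shingle_set = set()
--
--     # checks to procceed if and only if value of k > 0 and k is an integer
--     if(k <= 0 or type(k) != int):
--         raise Exception("The value of k(%f) should be positive integer" %(k))
--     # checks to procceed if and only if dna is non-empty and length of dna > k
--     elif len(dna) == 0 or k > len(dna):
--         raise Exception("The dna(%s) should have length greater than the value of k(%d)" %(dna, k))
--
--     #loops through all the characters in a dna string to form k-shingle
--     while(lastIndex <= len(dna)):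
--          # froms a k-shingle
--          shingle = dna[count:lastIndex]
--          # creates a list of bits indicating if the k-shingle contains character other than A, C, G or T; if it contains character other than 'A', 'C', 'G' and 'T' then True is inserted else False
--          flagUnwantedChar = list(x not in ["A", "C", "G", "T"] for x in shingle.upper())
--          # checks if the 'flagUnwantedChar' list contains any True bit (i.e. the shingle contains character other than 'A', 'C', 'G' and 'T') and warns the user accordingly
--          if any(flagUnwantedChar):
--              raise Exception("The provided DNA sample contains unwanted character: '%s' at Position %d" %(shingle[flagUnwantedChar.index(True)], count+flagUnwantedChar.index(True)+1))
--          #  adds the k-shingle to the set of k-shingle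
--          else:
--              shingle_set.add(dna[count:lastIndex])
--              count += 1
--              lastIndex = count+k
--
--     # returns the set containing all possible k-shingle of the dna
--     return shingle_set
-- ===== SOURCE B (Python) =====
-- def dna_shingle(dna, k):
--     # guards kept verbatim from the spec
--     if(k <= 0 or type(k) != int):
--         raise Exception("The value of k(%f) should be positive integer" %(k))
--     elif len(dna) == 0 or k > len(dna):
--         raise Exception("The dna(%s) should have length greater than the value of k(%d)" %(dna, k))
--     # one linear validation pass over the whole string
--     for i, c in enumerate(dna):
--         if c.upper() not in ("A", "C", "G", "T"):
--             raise Exception("The provided DNA sample contains unwanted character: '%s' at Position %d" %(c, i+1))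
--     # then build the shingle set in one comprehension
--     return {dna[i:i+k] for i in range(len(dna) - k + 1)}
-- ===== Notes on version B (the rewrite author's own statement) =====
-- stated objective: simpler
-- what changed: A validates characters shingle-by-shingle inside the sliding-window while loop (rebuilding a flag list per window); B does one separate linear validation pass over the whole string and then builds the set in a single comprehension.
import Mathlib
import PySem

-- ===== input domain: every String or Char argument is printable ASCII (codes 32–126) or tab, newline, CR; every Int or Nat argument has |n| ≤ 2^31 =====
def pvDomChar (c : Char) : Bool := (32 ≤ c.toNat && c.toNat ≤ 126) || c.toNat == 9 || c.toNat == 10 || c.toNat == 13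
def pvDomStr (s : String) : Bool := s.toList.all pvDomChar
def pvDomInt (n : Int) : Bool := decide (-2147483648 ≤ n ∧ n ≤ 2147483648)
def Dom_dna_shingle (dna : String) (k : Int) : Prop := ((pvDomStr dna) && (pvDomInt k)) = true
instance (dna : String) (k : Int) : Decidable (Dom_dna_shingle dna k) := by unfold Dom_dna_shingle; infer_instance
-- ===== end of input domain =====

-- B replaces A's per-shingle validation scan inside the while loop by one separate
-- linear validation pass over the string followed by a set comprehension (simpler).
-- Where the Python raises, both ports return [] — those inputs are outside Pre_.

-- ===== PORT A =====
-- A's while loop: count starts at 0, lastIndex = count + k; per iteration it slices,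
-- builds the unwanted-character flag list, raises on any True, else adds the shingle.
def dna_shingle_loopA (cs : List Char) (k : Nat) (count : Nat) (acc : PySem.Set String) :
    List String :=
  if h : count + k ≤ cs.length then
    let shingle := PySem.List.slice cs (some (count : Int)) (some ((count : Int) + (k : Int)))
    let flagUnwantedChar := (PySem.Chars.upper shingle).map
      (fun x => !(['A', 'C', 'G', 'T'].contains x))
    if flagUnwantedChar.any id then
      []  -- Python raises "unwanted character" here; outside Pre_
    else
      dna_shingle_loopA cs k (count + 1) (PySem.Set.add acc (String.ofList shingle))
  else
    acc
termination_by cs.length + 1 - (count + k)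

def dna_shingle (dna : String) (k : Int) : List String :=
  if k ≤ 0 then
    []  -- Python raises "should be positive integer"; outside Pre_
  else if PySem.Str.len dna = 0 ∨ k > PySem.Str.len dna then
    []  -- Python raises "length greater than the value of k"; outside Pre_
  else
    dna_shingle_loopA dna.toList k.toNat 0 PySem.Set.empty

-- ===== PORT B =====
def dna_shingle_alt (dna : String) (k : Int) : List String :=
  if k ≤ 0 then
    []  -- Python raises; outside Pre_
  else if PySem.Str.len dna = 0 ∨ k > PySem.Str.len dna then
    []  -- Python raises; outside Pre_
  else if dna.toList.any (fun c => !(['A', 'C', 'G', 'T'].contains (PySem.Chars.upperChar c))) then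
    []  -- B's linear validation pass raises at the first bad character; outside Pre_
  else
    (PySem.List.pyRange 0 (PySem.Str.len dna - k + 1) 1).foldl
      (fun s i =>
        PySem.Set.add s (String.ofList (PySem.List.slice dna.toList (some i) (some (i + k)))))
      PySem.Set.empty

-- ===== PRECONDITION & SPEC =====
-- Pre_ = exactly where the Python A returns: 1 ≤ k ≤ len(dna) and every character
-- uppercases to one of A, C, G, T (otherwise A raises).
def Pre_dna_shingle (dna : String) (k : Int) : Prop :=
  1 ≤ k ∧ k ≤ (dna.toList.length : Int) ∧
    dna.toList.all (fun c => ['A', 'C', 'G', 'T'].contains (PySem.Chars.upperChar c)) = true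
instance (dna : String) (k : Int) : Decidable (Pre_dna_shingle dna k) := by
  unfold Pre_dna_shingle; infer_instance

def pvWitness_dna_shingle : String × Int := ("acGT", 2)

def Spec_dna_shingle (dna : String) (k : Int) (out : List String) : Prop :=
  out = dna_shingle_alt dna k
instance (dna : String) (k : Int) (out : List String) : Decidable (Spec_dna_shingle dna k out) := by
  unfold Spec_dna_shingle; infer_instance

-- ===== CLAIM (what is proved, stated in full; the proofs are below) =====
def Claim_equal_dna_shingle : Prop := ∀ (dna : String) (k : Int), Dom_dna_shingle dna k →
  Pre_dna_shingle dna k → Spec_dna_shingle dna k (dna_shingle dna k)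

-- ===== LEMMAS AND PROOFS =====

-- a slice of an all-valid string contains no unwanted character
lemma flag_all_false (cs : List Char)
    (hval : cs.all (fun c => ['A', 'C', 'G', 'T'].contains (PySem.Chars.upperChar c)) = true)
    (a b : Option Int) :
    ((PySem.Chars.upper (PySem.List.slice cs a b)).map
      (fun x => !(['A', 'C', 'G', 'T'].contains x))).any id = false := by
  rw [List.any_eq_false]
  intro b hb
  simp only [List.mem_map, PySem.Chars.upper] at hb
  obtain ⟨x, hx, rfl⟩ := hb
  obtain ⟨c, hc, rfl⟩ := hx
  have hc' := List.all_eq_true.mp hval c (PySem.List.mem_of_mem_slice cs a b hc)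
  rw [hc']
  decide

-- A's while loop equals B's fold over the remaining range
lemma loopA_eq_fold (cs : List Char) (k : Nat) (hk : 1 ≤ k)
    (hval : cs.all (fun c => ['A', 'C', 'G', 'T'].contains (PySem.Chars.upperChar c)) = true) :
    ∀ (count : Nat) (acc : PySem.Set String),
      dna_shingle_loopA cs k count acc =
      (PySem.List.pyRange (count : Int) ((cs.length : Int) - (k : Int) + 1) 1).foldl
        (fun s i =>
          PySem.Set.add s (String.ofList (PySem.List.slice cs (some i) (some (i + k)))))
        acc := by
  intro count acc
  by_cases h : count + k ≤ cs.length
  · rw [dna_shingle_loopA]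
    simp only [h, dite_true]
    rw [flag_all_false cs hval]
    simp only [Bool.false_eq_true, if_false]
    rw [PySem.List.pyRange_one_cons (a := (count : Int)) (b := ((cs.length : Int) - (k : Int) + 1))
      (by omega)]
    rw [loopA_eq_fold cs k hk hval (count + 1)]
    simp only [List.foldl_cons, Nat.cast_add, Nat.cast_one]
  · rw [dna_shingle_loopA]
    simp only [h, dite_false]
    rw [PySem.List.pyRange_one_eq_nil (by omega)]
    rfl
termination_by count => cs.length + 1 - (count + k)

-- ===== VERDICT (by name: the statement is the Claim_ definition above) =====
theorem dna_shingle_spec : Claim_equal_dna_shingle := by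
  intro dna k _ hpre
  obtain ⟨hk1, hklen, hval⟩ := hpre
  unfold Spec_dna_shingle dna_shingle dna_shingle_alt
  have hk0 : ¬ k ≤ 0 := by omega
  have hlen : ¬ (PySem.Str.len dna = 0 ∨ k > PySem.Str.len dna) := by
    simp only [PySem.Str.len_eq]
    omega
  simp only [hk0, hlen, if_false]
  have hany : dna.toList.any
      (fun c => !(['A', 'C', 'G', 'T'].contains (PySem.Chars.upperChar c))) = false := by
    simp only [List.any_eq_false]
    intro c hc
    have hc' := List.all_eq_true.mp hval c hc
    rw [hc']
    decide
  rw [hany]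
  simp only [Bool.false_eq_true, if_false]
  rw [loopA_eq_fold dna.toList k.toNat (by omega) hval 0 PySem.Set.empty]
  have hkk : ((k.toNat : Int)) = k := by omega
  simp only [PySem.Str.len_eq, Nat.cast_zero, hkk]
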